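-- pv_equiv track=rewrite | github.com/sudo-self/lockboxpi | telegram_bot.py | is_malicious
-- ===== SOURCE A (Python) =====
-- def is_malicious(cmd: str) -> bool:
--     if not cmd:
--         return False
--     c = cmd.lower()
--     bad_patterns = [
--         "rm -rf", "rm -r", "rm -f", "mkfs", "dd if=", "shutdown", "poweroff",
--         "wget ", "curl ", "nc -e", "bash -i", ":(){", "mv /"
--     ]
--     return any(b in c for b in bad_patterns)
-- ===== SOURCE B (Python) =====
-- BAD = ("rm -rf", "rm -r", "rm -f", "mkfs", "dd if=", "shutdown", "poweroff",
--        "wget ", "curl ", "nc -e", "bash -i", ":(){", "mv /")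
--
--
-- def is_malicious(cmd: str) -> bool:
--     # single left-to-right scan: at each position test whether some bad
--     # pattern starts there (position-major instead of pattern-major)
--     c = cmd.lower()
--     for i in range(len(c)):
--         if any(c.startswith(b, i) for b in BAD):
--             return True
--     return False
-- ===== Notes on version B (the rewrite author's own statement) =====
-- stated objective: alternative
-- what changed: A scans the whole lowered string once per pattern (pattern-major, k independent substring searches); B makes a single position-major left-to-right pass, testing at each index whether any pattern starts there, with no empty-string guard.
import Mathlib
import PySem

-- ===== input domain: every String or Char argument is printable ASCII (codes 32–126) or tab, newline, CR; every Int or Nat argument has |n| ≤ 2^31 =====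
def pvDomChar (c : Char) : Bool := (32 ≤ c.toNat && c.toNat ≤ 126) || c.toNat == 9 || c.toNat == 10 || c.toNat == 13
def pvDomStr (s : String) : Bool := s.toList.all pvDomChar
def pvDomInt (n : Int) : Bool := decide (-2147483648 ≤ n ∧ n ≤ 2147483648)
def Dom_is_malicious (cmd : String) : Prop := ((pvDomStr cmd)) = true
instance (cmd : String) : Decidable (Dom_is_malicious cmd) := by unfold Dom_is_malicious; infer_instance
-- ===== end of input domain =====

-- B replaces A's thirteen independent substring scans by one position-major
-- left-to-right pass (at each index: does some pattern start here?); same cost class.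

-- ===== PORT A =====
def bad_patterns_a : List String :=
  ["rm -rf", "rm -r", "rm -f", "mkfs", "dd if=", "shutdown", "poweroff",
   "wget ", "curl ", "nc -e", "bash -i", ":(){", "mv /"]

def is_malicious (cmd : String) : Bool :=
  if cmd = "" then false
  else
    let c := PySem.Str.lower cmd
    bad_patterns_a.any (fun b => PySem.Str.isIn b c)

-- ===== PORT B =====
def badB : List (List Char) :=
  (["rm -rf", "rm -r", "rm -f", "mkfs", "dd if=", "shutdown", "poweroff",
    "wget ", "curl ", "nc -e", "bash -i", ":(){", "mv /"]).map String.toList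

-- the `for i in range(len(c))` loop of Source B as recursion over the suffixes of c
def scanBad : List Char → Bool
  | [] => false
  | a :: rest =>
    if badB.any (fun b => PySem.Chars.startswith (a :: rest) b) then true
    else scanBad rest

def is_malicious_alt (cmd : String) : Bool :=
  let c := PySem.Str.lower cmd
  scanBad c.toList

-- ===== PRECONDITION & SPEC =====
def Spec_is_malicious (cmd : String) (out : Bool) : Prop := out = is_malicious_alt cmd
instance (cmd : String) (out : Bool) : Decidable (Spec_is_malicious cmd out) := by unfold Spec_is_malicious; infer_instance

-- ===== CLAIM (what is proved, stated in full; the proofs are below) =====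
def Claim_equal_is_malicious : Prop := ∀ (cmd : String), Dom_is_malicious cmd → Spec_is_malicious cmd (is_malicious cmd)

-- ===== LEMMAS AND PROOFS =====

-- the position-major scan finds exactly the patterns occurring as infixes
theorem scanBad_eq_any_isIn (l : List Char) :
    scanBad l = badB.any (fun b => PySem.Chars.isIn b l) := by
  induction l with
  | nil => decide
  | cons a rest ih =>
    show (if badB.any (fun b => PySem.Chars.startswith (a :: rest) b) then true
          else scanBad rest) = _
    rw [ih]
    rcases h : badB.any (fun b => PySem.Chars.startswith (a :: rest) b) with _ | _
    · simp only [if_neg Bool.false_ne_true]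
      apply Bool.eq_iff_iff.mpr
      simp only [List.any_eq_true, PySem.Chars.isIn_iff_infix, List.infix_cons_iff]
      constructor
      · rintro ⟨b, hb, h2⟩; exact ⟨b, hb, Or.inr h2⟩
      · rintro ⟨b, hb, h2 | h2⟩
        · exfalso
          have := List.any_eq_false.mp (by simpa using h) b hb
          rw [PySem.Chars.startswith_iff] at this
          exact absurd h2 (by simpa using this)
        · exact ⟨b, hb, h2⟩
    · simp only [if_pos]
      rcases List.any_eq_true.mp h with ⟨b, hb, hs⟩
      symm
      refine List.any_eq_true.mpr ⟨b, hb, ?_⟩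
      rw [PySem.Chars.isIn_iff_infix]
      exact (PySem.Chars.startswith_iff _ _ |>.mp hs).isInfix

-- ===== VERDICT (by name: the statement is the Claim_ definition above) =====
theorem is_malicious_spec : Claim_equal_is_malicious := by
  intro cmd _
  unfold Spec_is_malicious is_malicious is_malicious_alt
  rw [scanBad_eq_any_isIn]
  by_cases h : cmd = ""
  · subst h; decide
  · simp only [if_neg h, badB, List.any_map, bad_patterns_a]
    apply List.any_congr rfl
    intro b
    simp [PySem.Str.isIn_eq]
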